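-- pv_equiv track=rewrite | github.com/BD20171998/Data-Structures-and-Algorithms-Practice | Binarysearch.io/Furthest From Origin.py | solve
-- ===== SOURCE A (Python) =====
-- def solve(s):
--
--     dist = 0
--     move = 0
--     for i in s:
--
--         if i == 'L':
--             dist -= 1
--
--         elif i == 'R':
--             dist += 1
--
--         else:
--             move += 1
--
--     return abs(dist)+move
-- ===== SOURCE B (Python) =====
-- def solve(s):
--     freq = {}
--     for ch in s:
--         freq[ch] = freq.get(ch, 0) + 1
--     return len(s) - 2 * min(freq.get('L', 0), freq.get('R', 0))
-- ===== Notes on version B (the rewrite author's own statement) =====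
-- stated objective: alternative
-- what changed: Builds a character-frequency dictionary in one uniform pass (no branching, no dist/move accumulators) and returns len(s) - 2*min(freq of L, freq of R): each matched L/R pair cancels two units of distance, so no abs and no separate move count are computed.
import Mathlib
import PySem

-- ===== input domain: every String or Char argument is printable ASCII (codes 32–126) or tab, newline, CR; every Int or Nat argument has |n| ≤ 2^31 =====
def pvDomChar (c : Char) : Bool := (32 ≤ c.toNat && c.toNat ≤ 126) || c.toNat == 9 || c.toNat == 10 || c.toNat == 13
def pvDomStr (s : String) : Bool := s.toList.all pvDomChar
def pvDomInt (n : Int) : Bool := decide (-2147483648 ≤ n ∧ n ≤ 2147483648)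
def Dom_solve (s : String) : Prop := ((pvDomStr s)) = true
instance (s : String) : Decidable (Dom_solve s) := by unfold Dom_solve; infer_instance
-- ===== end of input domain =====

-- B builds a frequency dictionary in one uniform pass and returns len - 2*min(freq L, freq R) (pair cancellation), replacing A's branching dist/move loop.

-- ===== PORT A =====
def solve (s : String) : Int :=
  let st := s.toList.foldl
    (fun (p : Int × Int) i =>
      if i = 'L' then (p.1 - 1, p.2)
      else if i = 'R' then (p.1 + 1, p.2)
      else (p.1, p.2 + 1))
    (0, 0)
  |st.1| + st.2

-- ===== PORT B =====
def solve_alt (s : String) : Int :=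
  -- freq[ch] = freq.get(ch, 0) + 1  ≡  Dict.modify ch 0 (· + 1)
  let freq : PySem.Dict Char Int :=
    s.toList.foldl (fun d ch => d.modify ch 0 (· + 1)) PySem.Dict.empty
  PySem.Str.len s - 2 * min (freq.getD 'L' 0) (freq.getD 'R' 0)

-- ===== PRECONDITION & SPEC =====
def Spec_solve (s : String) (out : Int) : Prop := out = solve_alt s
instance (s : String) (out : Int) : Decidable (Spec_solve s out) := by unfold Spec_solve; infer_instance

-- ===== CLAIM (what is proved, stated in full; the proofs are below) =====
def Claim_equal_solve : Prop := ∀ (s : String), Dom_solve s → Spec_solve s (solve s)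

-- ===== LEMMAS AND PROOFS =====

-- A's loop, characterised by counts
theorem loop_eq (cs : List Char) : ∀ d m : Int,
    cs.foldl
      (fun (p : Int × Int) i =>
        if i = 'L' then (p.1 - 1, p.2)
        else if i = 'R' then (p.1 + 1, p.2)
        else (p.1, p.2 + 1)) (d, m)
    = (d + (cs.count 'R' : Int) - (cs.count 'L' : Int),
       m + ((cs.length : Int) - (cs.count 'L' : Int) - (cs.count 'R' : Int))) := by
  induction cs with
  | nil => intro d m; simp
  | cons c t ih =>
    intro d m
    by_cases hL : c = 'L'
    · subst hL
      simp only [List.foldl_cons, ih, List.count_cons, List.length_cons, Prod.mk.injEq]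
      constructor <;> (simp; try push_cast; try ring)
    · by_cases hR : c = 'R'
      · subst hR
        simp only [List.foldl_cons, if_neg (by decide : ¬('R' = 'L')), ih,
          List.count_cons, List.length_cons, Prod.mk.injEq]
        constructor <;> (simp; try push_cast; try ring)
      · simp only [List.foldl_cons, if_neg hL, if_neg hR, ih, List.count_cons,
          List.length_cons, Prod.mk.injEq]
        constructor <;>
          (simp [beq_eq_false_iff_ne.mpr hL, beq_eq_false_iff_ne.mpr hR]; try push_cast; try ring)

-- the two direction counts together never exceed the length
theorem countLR_le_length (cs : List Char) : cs.count 'L' + cs.count 'R' ≤ cs.length := by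
  induction cs with
  | nil => simp
  | cons c t ih =>
    by_cases hL : c = 'L' <;> by_cases hR : c = 'R' <;>
      simp_all [List.count_cons] <;> omega

-- ===== VERDICT (by name: the statement is the Claim_ definition above) =====
theorem solve_spec : Claim_equal_solve := by
  intro s _
  show solve s = solve_alt s
  have h := countLR_le_length s.toList
  simp only [solve, solve_alt, loop_eq, PySem.Str.len,
    ← PySem.Dict.counter_eq_foldl, PySem.Dict.getD_counter]
  rcases abs_cases (0 + (s.toList.count 'R' : Int) - (s.toList.count 'L' : Int)) with
    ⟨he, _⟩ | ⟨he, _⟩ <;> rw [he] <;> omega
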